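-- pv_equiv track=rewrite | github.com/RenZQ-xx/AI_Bell | src/experiments/322/FacetExpensionV2/train_supervised_transition.py | nearest_target_index
-- ===== SOURCE A (Python) =====
-- def nearest_target_index(source_mask: list[int], candidate_masks: list[list[int]]) -> tuple[int, int]:
--     best_index = 0
--     best_hamming = None
--     for index, mask in enumerate(candidate_masks):
--         hamming = sum(int(left != right) for left, right in zip(source_mask, mask))
--         if best_hamming is None or hamming < best_hamming:
--             best_hamming = hamming
--             best_index = index
--     return best_index, int(best_hamming if best_hamming is not None else 0)
-- ===== SOURCE B (Python) =====
-- def nearest_target_index(source_mask: list[int], candidate_masks: list[list[int]]) -> tuple[int, int]: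
--     def hamming(mask):
--         return sum(int(left != right) for left, right in zip(source_mask, mask))
--     order = sorted(range(len(candidate_masks)), key=lambda i: hamming(candidate_masks[i]))
--     if not order:
--         return (0, 0)
--     best = order[0]
--     return (best, hamming(candidate_masks[best]))
-- ===== Notes on version B (the rewrite author's own statement) =====
-- stated objective: alternative
-- what changed: Replaces A's single running-min loop over enumerate by a sort-based selection: stably sort the candidate indices by their Hamming distance and take the first index of the sorted order (stability reproduces A's first-minimum tie-break).
import Mathlib
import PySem

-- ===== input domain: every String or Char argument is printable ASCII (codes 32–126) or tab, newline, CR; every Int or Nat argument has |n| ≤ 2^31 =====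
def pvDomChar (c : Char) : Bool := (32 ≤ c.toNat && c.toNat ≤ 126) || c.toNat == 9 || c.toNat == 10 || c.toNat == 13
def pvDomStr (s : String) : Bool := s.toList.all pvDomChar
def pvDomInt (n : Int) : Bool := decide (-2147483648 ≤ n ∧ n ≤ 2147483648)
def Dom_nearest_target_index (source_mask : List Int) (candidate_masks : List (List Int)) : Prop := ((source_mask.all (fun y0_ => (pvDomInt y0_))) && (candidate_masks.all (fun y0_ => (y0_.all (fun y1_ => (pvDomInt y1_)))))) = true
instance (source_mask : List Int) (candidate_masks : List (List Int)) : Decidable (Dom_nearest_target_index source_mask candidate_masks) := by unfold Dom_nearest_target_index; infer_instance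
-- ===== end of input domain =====

-- B replaces A's running-min loop by a stable sort of the candidate indices on their Hamming distance,
-- returning the first index of the sorted order (objective: alternative; stability gives A's first-min tie-break).

-- ===== PORT A =====
-- hamming = sum(int(left != right) for left, right in zip(source_mask, mask))
def pvHam (source_mask mask : List Int) : Int :=
  ((source_mask.zip mask).map (fun q => if q.1 ≠ q.2 then (1 : Int) else 0)).sum

def nearest_target_index (source_mask : List Int) (candidate_masks : List (List Int)) : Int × Int :=
  let st :=
    (PySem.List.enumerate candidate_masks).foldl
      (fun (st : Int × Option Int) p =>
        let hamming := pvHam source_mask p.2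
        match st.2 with
        | none => (p.1, some hamming)
        | some bh => if hamming < bh then (p.1, some hamming) else st)
      (0, none)
  (st.1, st.2.getD 0)

-- ===== PORT B =====
-- order = sorted(range(len(candidate_masks)), key=lambda i: hamming(candidate_masks[i]))
def nearest_target_index_alt (source_mask : List Int) (candidate_masks : List (List Int)) : Int × Int :=
  let order :=
    PySem.List.sorted (PySem.List.pyRange 0 (PySem.List.len candidate_masks) 1)
      (fun i => pvHam source_mask (PySem.List.pyGetD candidate_masks i []))
  match order with
  | [] => (0, 0)
  | best :: _ => (best, pvHam source_mask (PySem.List.pyGetD candidate_masks best []))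

-- ===== PRECONDITION & SPEC =====
def Spec_nearest_target_index (source_mask : List Int) (candidate_masks : List (List Int)) (out : Int × Int) : Prop := out = nearest_target_index_alt source_mask candidate_masks
instance (source_mask : List Int) (candidate_masks : List (List Int)) (out : Int × Int) : Decidable (Spec_nearest_target_index source_mask candidate_masks out) := by unfold Spec_nearest_target_index; infer_instance

-- ===== CLAIM (what is proved, stated in full; the proofs are below) =====
def Claim_equal_nearest_target_index : Prop := ∀ (source_mask : List Int) (candidate_masks : List (List Int)), Dom_nearest_target_index source_mask candidate_masks → Spec_nearest_target_index source_mask candidate_masks (nearest_target_index source_mask candidate_masks)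

-- ===== LEMMAS AND PROOFS =====

-- the per-index key both ports compare: the Hamming distance of candidate i
def pvKey (sm : List Int) (cms : List (List Int)) (i : Int) : Int :=
  pvHam sm (PySem.List.pyGetD cms i [])

-- the common running argmin both programs determine (first element of minimal key)
def pvG (k : Int → Int) (l : List Int) (j : Int) : Int :=
  l.foldl (fun m i => if k i < k m then i else m) j

theorem min?_cons (k : Int → Int) (l : List Int) : ∀ (x : Int),
    PySem.List.min? (x :: l) k = some (pvG k l x) := by
  induction l with
  | nil => intro x; simp [PySem.List.min?, pvG]
  | cons i t ih =>
    intro x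
    by_cases h : k i < k x
    · have := ih i
      simp [PySem.List.min?, pvG, h] at this ⊢
      exact this
    · have := ih x
      simp [PySem.List.min?, pvG, h] at this ⊢
      exact this

-- the head of Python's stable sort is the FIRST minimal element, i.e. min(xs, key=k)
theorem min?_append_none (k : Int → Int) (xs : List Int) (x : Int)
    (h : PySem.List.min? xs k = none) :
    PySem.List.min? (xs ++ [x]) k = some x := by
  simp only [PySem.List.min?] at h ⊢
  rw [List.foldl_append, List.foldl_cons, List.foldl_nil, h]

theorem min?_append_some (k : Int → Int) (xs : List Int) (x m : Int)
    (h : PySem.List.min? xs k = some m) :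
    PySem.List.min? (xs ++ [x]) k = if k x < k m then some x else some m := by
  simp only [PySem.List.min?] at h ⊢
  rw [List.foldl_append, List.foldl_cons, List.foldl_nil, h]

theorem head_sorted_eq_min? (k : Int → Int) (xs : List Int) :
    (PySem.List.sorted xs k).head? = Option.map id (PySem.List.min? xs k) := by
  rw [PySem.List.sorted_eq_foldl_insertBy]
  induction xs using List.reverseRecOn with
  | nil => simp [PySem.List.min?]
  | append_singleton xs x ih =>
    rw [List.foldl_append]
    simp only [List.foldl_cons, List.foldl_nil]
    cases hS : List.foldl (fun acc y => PySem.List.insertBy (fun a b => decide (k a < k b)) y acc) [] xs with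
    | nil =>
      rw [hS] at ih
      simp only [List.head?_nil] at ih
      have hm : PySem.List.min? xs k = none := by
        cases hm' : PySem.List.min? xs k with
        | none => rfl
        | some m => rw [hm'] at ih; simp at ih
      rw [min?_append_none k xs x hm]
      simp [PySem.List.insertBy]
    | cons m t =>
      rw [hS] at ih
      have hmin : PySem.List.min? xs k = some m := by
        cases hm : PySem.List.min? xs k with
        | none => rw [hm] at ih; simp at ih
        | some m' => rw [hm] at ih; simp at ih; rw [ih]
      rw [min?_append_some k xs x m hmin]
      by_cases h : k x < k m
      · simp [PySem.List.insertBy, h]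
      · simp [PySem.List.insertBy, h]

theorem foldA_pair (k : Int → Int) (l : List Int) : ∀ (j : Int),
    l.foldl
      (fun (st : Int × Option Int) i =>
        match st.2 with
        | none => (i, some (k i))
        | some bh => if k i < bh then (i, some (k i)) else st)
      (j, some (k j))
    = (pvG k l j, some (k (pvG k l j))) := by
  induction l with
  | nil => intro j; simp [pvG]
  | cons i t ih =>
    intro j
    by_cases h : k i < k j
    · simpa [pvG, List.foldl_cons, h] using ih i
    · simpa [pvG, List.foldl_cons, h] using ih j

theorem A_eq (sm m : List Int) (t : List (List Int)) :
    nearest_target_index sm (m :: t) =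
      (pvG (pvKey sm (m :: t)) (PySem.List.pyRange 1 (PySem.List.len (m :: t)) 1) 0,
       pvKey sm (m :: t) (pvG (pvKey sm (m :: t)) (PySem.List.pyRange 1 (PySem.List.len (m :: t)) 1) 0)) := by
  have hlen : (0 : Int) < PySem.List.len (m :: t) := by
    simp [PySem.List.len]
  unfold nearest_target_index
  rw [PySem.List.enumerate_eq_map_pyRange (m :: t) ([] : List Int), List.foldl_map]
  show ((List.foldl
        (fun (st : Int × Option Int) i =>
          match st.2 with
          | none => (i, some (pvKey sm (m :: t) i))
          | some bh => if pvKey sm (m :: t) i < bh then (i, some (pvKey sm (m :: t) i)) else st)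
        (0, none) (PySem.List.pyRange 0 (PySem.List.len (m :: t)) 1)).1,
      (List.foldl
        (fun (st : Int × Option Int) i =>
          match st.2 with
          | none => (i, some (pvKey sm (m :: t) i))
          | some bh => if pvKey sm (m :: t) i < bh then (i, some (pvKey sm (m :: t) i)) else st)
        (0, none) (PySem.List.pyRange 0 (PySem.List.len (m :: t)) 1)).2.getD 0) = _
  rw [PySem.List.pyRange_one_cons hlen]
  show ((List.foldl
        (fun (st : Int × Option Int) i =>
          match st.2 with
          | none => (i, some (pvKey sm (m :: t) i))
          | some bh => if pvKey sm (m :: t) i < bh then (i, some (pvKey sm (m :: t) i)) else st)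
        (0, some (pvKey sm (m :: t) 0)) (PySem.List.pyRange (0 + 1) (PySem.List.len (m :: t)) 1)).1,
      (List.foldl
        (fun (st : Int × Option Int) i =>
          match st.2 with
          | none => (i, some (pvKey sm (m :: t) i))
          | some bh => if pvKey sm (m :: t) i < bh then (i, some (pvKey sm (m :: t) i)) else st)
        (0, some (pvKey sm (m :: t) 0)) (PySem.List.pyRange (0 + 1) (PySem.List.len (m :: t)) 1)).2.getD 0) = _
  rw [foldA_pair]
  norm_num

theorem B_eq (sm m : List Int) (t : List (List Int)) :
    nearest_target_index_alt sm (m :: t) =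
      (pvG (pvKey sm (m :: t)) (PySem.List.pyRange 1 (PySem.List.len (m :: t)) 1) 0,
       pvKey sm (m :: t) (pvG (pvKey sm (m :: t)) (PySem.List.pyRange 1 (PySem.List.len (m :: t)) 1) 0)) := by
  have hlen : (0 : Int) < PySem.List.len (m :: t) := by
    simp [PySem.List.len]
  have hr : PySem.List.pyRange 0 (PySem.List.len (m :: t)) 1
      = 0 :: PySem.List.pyRange (0 + 1) (PySem.List.len (m :: t)) 1 :=
    PySem.List.pyRange_one_cons hlen
  have hhead := head_sorted_eq_min? (pvKey sm (m :: t))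
      (0 :: PySem.List.pyRange (0 + 1) (PySem.List.len (m :: t)) 1)
  rw [min?_cons] at hhead
  unfold nearest_target_index_alt
  show (match PySem.List.sorted (PySem.List.pyRange 0 (PySem.List.len (m :: t)) 1) (pvKey sm (m :: t)) with
        | [] => ((0 : Int), (0 : Int))
        | best :: _ => (best, pvKey sm (m :: t) best)) = _
  rw [hr]
  cases hS : PySem.List.sorted (0 :: PySem.List.pyRange (0 + 1) (PySem.List.len (m :: t)) 1) (pvKey sm (m :: t)) with
  | nil => rw [hS] at hhead; simp at hhead
  | cons b tail =>
    rw [hS] at hhead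
    simp only [List.head?_cons, Option.map_some, id] at hhead
    have hb : b = pvG (pvKey sm (m :: t)) (PySem.List.pyRange (0 + 1) (PySem.List.len (m :: t)) 1) 0 :=
      Option.some.inj hhead
    simp only [hb]
    norm_num

-- ===== VERDICT (by name: the statement is the Claim_ definition above) =====
theorem nearest_target_index_spec : Claim_equal_nearest_target_index := by
  intro source_mask candidate_masks _
  unfold Spec_nearest_target_index
  cases candidate_masks with
  | nil =>
    simp [nearest_target_index, nearest_target_index_alt, PySem.List.enumerate,
      PySem.List.len, PySem.List.pyRange, PySem.List.sorted]
  | cons m t => rw [A_eq, B_eq]
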